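-- pv_equiv track=rewrite | github.com/alaalqadi/py2neo | py2neo/util.py | pendulate
-- ===== SOURCE A (Python) =====
-- def pendulate(collection):
--     count = len(collection)
--     for i in range(count):
--         if i % 2 == 0:
--             index = i // 2
--         else:
--             index = count - ((i + 1) // 2)
--         yield index, collection[index]
-- ===== SOURCE B (Python) =====
-- def pendulate(collection):
--     left, right = 0, len(collection) - 1
--     while left <= right:
--         yield left, collection[left]
--         if left != right:
--             yield right, collection[right]
--         left += 1
--         right -= 1
-- ===== Notes on version B (the rewrite author's own statement) =====
-- stated objective: simpler
-- what changed: Replaces the index-by-parity formula (i%2, i//2, count-(i+1)//2) over range(count) with a two-cursor loop that walks left and right pointers towards each other, yielding front then back each round.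
import Mathlib
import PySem

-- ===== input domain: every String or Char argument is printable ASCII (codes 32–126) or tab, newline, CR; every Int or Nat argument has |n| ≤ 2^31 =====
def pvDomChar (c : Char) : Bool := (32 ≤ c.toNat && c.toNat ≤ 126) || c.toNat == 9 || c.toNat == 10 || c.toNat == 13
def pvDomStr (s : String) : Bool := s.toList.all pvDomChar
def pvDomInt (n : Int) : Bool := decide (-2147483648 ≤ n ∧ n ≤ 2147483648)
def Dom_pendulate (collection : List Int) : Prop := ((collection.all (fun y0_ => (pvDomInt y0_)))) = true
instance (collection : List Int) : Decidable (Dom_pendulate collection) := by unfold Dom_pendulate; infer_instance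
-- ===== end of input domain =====

-- B replaces A's index-by-parity formula over range(count) with a two-cursor loop (simpler decomposition, same O(n) cost).

-- ===== PORT A =====
-- literal port of A: for i in range(count) yield the formula-computed index and the element there
def pendulate (collection : List Int) : List (Int × Int) :=
  let count : Int := collection.length
  (PySem.List.pyRange 0 count 1).map (fun i =>
    let index : Int :=
      if PySem.Int.mod i 2 = 0 then PySem.Int.floordiv i 2
      else count - PySem.Int.floordiv (i + 1) 2
    (index, PySem.List.pyGetD collection index 0))

-- ===== PORT B =====
-- two cursors walking inwards; yields (left, x) then (right, x) unless they meet
def pendulateAux (collection : List Int) (left right : Int) : List (Int × Int) :=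
  if _h : left ≤ right then
    (left, PySem.List.pyGetD collection left 0) ::
      ((if left ≠ right then [(right, PySem.List.pyGetD collection right 0)] else []) ++
        pendulateAux collection (left + 1) (right - 1))
  else []
termination_by (right + 1 - left).toNat
decreasing_by omega

def pendulate_alt (collection : List Int) : List (Int × Int) :=
  pendulateAux collection 0 ((collection.length : Int) - 1)

-- ===== PRECONDITION & SPEC =====
def Spec_pendulate (collection : List Int) (out : List (Int × Int)) : Prop := out = pendulate_alt collection
instance (collection : List Int) (out : List (Int × Int)) : Decidable (Spec_pendulate collection out) := by unfold Spec_pendulate; infer_instance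

-- ===== CLAIM (what is proved, stated in full; the proofs are below) =====
def Claim_equal_pendulate : Prop := ∀ (collection : List Int), Dom_pendulate collection → Spec_pendulate collection (pendulate collection)

-- ===== LEMMAS AND PROOFS =====

def pendBody (c : List Int) (count i : Int) : Int × Int :=
  let index : Int :=
    if PySem.Int.mod i 2 = 0 then PySem.Int.floordiv i 2
    else count - PySem.Int.floordiv (i + 1) 2
  (index, PySem.List.pyGetD c index 0)

lemma pendBody_even (c : List Int) (count : Int) (k : Nat) :
    pendBody c count (2 * (k : Int)) = ((k : Int), PySem.List.pyGetD c (k : Int) 0) := by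
  have hm : PySem.Int.mod (2 * (k : Int)) 2 = 0 := by
    rw [PySem.Int.mod_eq_emod_of_pos (show (0:Int) < 2 by omega)]; omega
  have hd : PySem.Int.floordiv (2 * (k : Int)) 2 = (k : Int) := by
    rw [PySem.Int.floordiv_eq_ediv_of_pos (show (0:Int) < 2 by omega)]; omega
  simp only [pendBody, hm, hd]
  simp

lemma pendBody_odd (c : List Int) (count : Int) (k : Nat) :
    pendBody c count (2 * (k : Int) + 1) =
      (count - ((k : Int) + 1), PySem.List.pyGetD c (count - ((k : Int) + 1)) 0) := by
  have hm : PySem.Int.mod (2 * (k : Int) + 1) 2 = 1 := by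
    rw [PySem.Int.mod_eq_emod_of_pos (show (0:Int) < 2 by omega)]; omega
  have hd : PySem.Int.floordiv (2 * (k : Int) + 1 + 1) 2 = (k : Int) + 1 := by
    rw [PySem.Int.floordiv_eq_ediv_of_pos (show (0:Int) < 2 by omega)]; omega
  simp only [pendBody, hm, hd]
  simp

-- main invariant: the tail of A's formula-loop starting at i = 2k equals B's cursor loop at (k, n-1-k)
lemma pend_main (c : List Int) (n k : Nat) (hk : 2 * k ≤ n) :
    (PySem.List.pyRange (2 * (k : Int)) (n : Int) 1).map (pendBody c (n : Int)) =
      pendulateAux c (k : Int) ((n : Int) - 1 - (k : Int)) := by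
  induction hm : n - 2 * k using Nat.strong_induction_on generalizing k with
  | _ m ih =>
  subst hm
  rcases Nat.lt_or_ge (n) (2 * k + 1) with h0 | h1
  · -- empty: n ≤ 2k
    rw [PySem.List.pyRange_one_eq_nil (by push_cast; omega), pendulateAux]
    rw [dif_neg (by omega)]
    simp
  · rcases Nat.lt_or_ge n (2 * k + 2) with h2 | h3
    · -- exactly one element: n = 2k+1, left = right = k
      have hn : n = 2 * k + 1 := by omega
      subst hn
      rw [PySem.List.pyRange_one_cons (by push_cast; omega),
          PySem.List.pyRange_one_eq_nil (by push_cast; omega)]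
      rw [pendulateAux, dif_pos (by omega)]
      rw [pendulateAux, dif_neg (by omega)]
      have hlr : ((2*k+1 : Nat) : Int) - 1 - (k : Int) = (k : Int) := by push_cast; omega
      simp only [List.map_cons, List.map_nil, hlr]
      rw [if_neg (by omega)]
      simpa using pendBody_even c ((2*k+1 : Nat) : Int) k
    · -- at least two: peel 2k and 2k+1
      rw [PySem.List.pyRange_one_cons (by push_cast; omega),
          PySem.List.pyRange_one_cons (by push_cast; omega)]
      rw [pendulateAux, dif_pos (by omega)]
      rw [if_pos (by omega)]
      have hrec : (2 * (k : Int)) + 1 + 1 = 2 * ((k + 1 : Nat) : Int) := by push_cast; ring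
      have ih' := ih (n - 2 * (k + 1)) (by omega) (k + 1) (by omega) rfl
      simp only [List.map_cons, hrec, ih']
      have e1 := pendBody_even c (n : Int) k
      have e2 := pendBody_odd c (n : Int) k
      have hidx : (n : Int) - ((k : Int) + 1) = (n : Int) - 1 - (k : Int) := by ring
      rw [hidx] at e2
      have hl : (k : Int) + 1 = ((k + 1 : Nat) : Int) := by push_cast; ring
      have hr : (n : Int) - 1 - (k : Int) - 1 = (n : Int) - 1 - ((k + 1 : Nat) : Int) := by
        push_cast; ring
      rw [e1, e2, hl, hr]
      simp

-- ===== VERDICT (by name: the statement is the Claim_ definition above) =====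
theorem pendulate_spec : Claim_equal_pendulate := by
  intro c _
  unfold Spec_pendulate pendulate pendulate_alt
  have h := pend_main c c.length 0 (by omega)
  simp only [Nat.cast_zero, mul_zero, sub_zero] at h
  exact h
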